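-- pv_equiv track=rewrite | github.com/NVIDIA/GenerativeAIExamples | community/smart-health-agent/document_processor.py | process_text_blocks
-- ===== SOURCE A (Python) =====
-- def process_text_blocks(text_blocks, char_count_threshold=500):
--     """Group text blocks based on character count."""
--     current_group = []
--     grouped_blocks = []
--     current_char_count = 0
--
--     for block in text_blocks:
--         if current_char_count + len(block[4]) <= char_count_threshold:
--             current_group.append(block)
--             current_char_count += len(block[4])
--         else:
--             if current_group:
--                 grouped_blocks.append((current_group[0], "\n".join([b[4] for b in current_group])))
--             current_group = [block]
--             current_char_count = len(block[4])
--
--     if current_group: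
--         grouped_blocks.append((current_group[0], "\n".join([b[4] for b in current_group])))
--     return grouped_blocks
-- ===== SOURCE B (Python) =====
-- def process_text_blocks(text_blocks, char_count_threshold=500):
--     """Group text blocks by repeatedly splitting off the longest nonempty prefix
--     whose total character count fits the threshold (always at least one block)."""
--     grouped = []
--     rest = text_blocks
--     while rest:
--         total = len(rest[0][4])
--         k = 1
--         while k < len(rest) and total + len(rest[k][4]) <= char_count_threshold:
--             total += len(rest[k][4])
--             k += 1
--         head, rest = rest[:k], rest[k:]
--         grouped.append((head[0], "\n".join(b[4] for b in head)))
--     return grouped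
-- ===== Notes on version B (the rewrite author's own statement) =====
-- stated objective: alternative
-- what changed: B replaces A's single stateful fold over blocks (current_group/current_char_count with in-loop flushes and a trailing flush) by a chunk-splitting loop over GROUPS: each iteration scans ahead from the head of the remaining list to find the longest prefix whose total length fits (at least one block), slices it off, and emits it; this is correct because A's greedy reset rule makes every emitted group exactly such a maximal fitting prefix.
import Mathlib
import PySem

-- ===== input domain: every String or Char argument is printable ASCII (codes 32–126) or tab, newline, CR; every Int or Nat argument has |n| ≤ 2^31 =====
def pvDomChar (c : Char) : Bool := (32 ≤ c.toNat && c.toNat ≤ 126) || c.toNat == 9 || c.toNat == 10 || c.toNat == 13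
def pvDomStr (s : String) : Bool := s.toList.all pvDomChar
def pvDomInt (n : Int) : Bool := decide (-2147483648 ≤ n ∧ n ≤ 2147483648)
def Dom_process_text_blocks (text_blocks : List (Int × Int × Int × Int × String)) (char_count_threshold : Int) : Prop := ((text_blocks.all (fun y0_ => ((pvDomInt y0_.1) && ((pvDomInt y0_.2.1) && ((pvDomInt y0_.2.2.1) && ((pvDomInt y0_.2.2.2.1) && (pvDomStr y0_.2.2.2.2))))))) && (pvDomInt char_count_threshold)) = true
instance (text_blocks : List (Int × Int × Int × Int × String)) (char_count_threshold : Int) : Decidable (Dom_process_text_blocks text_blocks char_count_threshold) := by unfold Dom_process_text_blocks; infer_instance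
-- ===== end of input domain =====

-- B replaces A's stateful fold (running group + count, flushes) by a chunk-splitting loop
-- that repeatedly slices off the longest fitting prefix; same result, different decomposition.

-- ===== PORT A =====
-- (current_group[0], "\n".join([b[4] for b in current_group])); used on nonempty groups only
def pvEmit (g : List (Int × Int × Int × Int × String)) : (Int × Int × Int × Int × String) × String :=
  (g.headI, PySem.Str.join "\n" (g.map (fun b => b.2.2.2.2)))

-- one iteration of A's loop body over state (current_group, grouped_blocks, current_char_count)
def pvStepA (char_count_threshold : Int)
    (st : List (Int × Int × Int × Int × String) × List ((Int × Int × Int × Int × String) × String) × Int)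
    (block : Int × Int × Int × Int × String) :
    List (Int × Int × Int × Int × String) × List ((Int × Int × Int × Int × String) × String) × Int :=
  if st.2.2 + PySem.Str.len block.2.2.2.2 ≤ char_count_threshold then
    (st.1 ++ [block], st.2.1, st.2.2 + PySem.Str.len block.2.2.2.2)
  else if st.1 ≠ [] then
    ([block], st.2.1 ++ [pvEmit st.1], PySem.Str.len block.2.2.2.2)
  else
    ([block], st.2.1, PySem.Str.len block.2.2.2.2)

-- the trailing 'if current_group: grouped_blocks.append(…)' flush
def pvFinishA (st : List (Int × Int × Int × Int × String) × List ((Int × Int × Int × Int × String) × String) × Int) :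
    List ((Int × Int × Int × Int × String) × String) :=
  if st.1 ≠ [] then st.2.1 ++ [pvEmit st.1] else st.2.1

def process_text_blocks (text_blocks : List (Int × Int × Int × Int × String)) (char_count_threshold : Int) : List ((Int × Int × Int × Int × String) × String) :=
  pvFinishA (text_blocks.foldl (pvStepA char_count_threshold) ([], [], 0))

-- ===== PORT B =====
-- B's inner scan: how many further blocks after the forced head still fit (total starts at len(head))
def pvFitLen (thr : Int) (total : Int) : List (Int × Int × Int × Int × String) → Nat
  | [] => 0
  | b :: rest =>
    if total + PySem.Str.len b.2.2.2.2 ≤ thr then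
      1 + pvFitLen thr (total + PySem.Str.len b.2.2.2.2) rest
    else 0

-- B's outer loop: slice off head :: (fitting prefix), emit it, continue on the remainder
def pvChunk (thr : Int) : List (Int × Int × Int × Int × String) → List ((Int × Int × Int × Int × String) × String)
  | [] => []
  | b :: rest =>
    let k := pvFitLen thr (PySem.Str.len b.2.2.2.2) rest
    pvEmit (b :: rest.take k) :: pvChunk thr (rest.drop k)
termination_by l => l.length
decreasing_by simp [List.length_drop]

def process_text_blocks_alt (text_blocks : List (Int × Int × Int × Int × String)) (char_count_threshold : Int) : List ((Int × Int × Int × Int × String) × String) :=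
  pvChunk char_count_threshold text_blocks

-- ===== PRECONDITION & SPEC =====
def Spec_process_text_blocks (text_blocks : List (Int × Int × Int × Int × String)) (char_count_threshold : Int) (out : List ((Int × Int × Int × Int × String) × String)) : Prop := out = process_text_blocks_alt text_blocks char_count_threshold
instance (text_blocks : List (Int × Int × Int × Int × String)) (char_count_threshold : Int) (out : List ((Int × Int × Int × Int × String) × String)) : Decidable (Spec_process_text_blocks text_blocks char_count_threshold out) := by unfold Spec_process_text_blocks; infer_instance

-- ===== CLAIM (what is proved, stated in full; the proofs are below) =====
def Claim_equal_process_text_blocks : Prop := ∀ (text_blocks : List (Int × Int × Int × Int × String)) (char_count_threshold : Int), Dom_process_text_blocks text_blocks char_count_threshold → Spec_process_text_blocks text_blocks char_count_threshold (process_text_blocks text_blocks char_count_threshold)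

-- ===== LEMMAS AND PROOFS =====

lemma pvFitLen_cons (thr total : Int) (b : Int × Int × Int × Int × String) (rest : List (Int × Int × Int × Int × String)) :
    pvFitLen thr total (b :: rest)
      = if total + PySem.Str.len b.2.2.2.2 ≤ thr then 1 + pvFitLen thr (total + PySem.Str.len b.2.2.2.2) rest else 0 := rfl

lemma pvChunk_cons (thr : Int) (b : Int × Int × Int × Int × String) (rest : List (Int × Int × Int × Int × String)) :
    pvChunk thr (b :: rest)
      = pvEmit (b :: rest.take (pvFitLen thr (PySem.Str.len b.2.2.2.2) rest))
        :: pvChunk thr (rest.drop (pvFitLen thr (PySem.Str.len b.2.2.2.2) rest)) := by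
  rw [pvChunk.eq_def]

-- a pure characterisation of A's greedy grouping
def pvGroups (thr : Int) (cg : List (Int × Int × Int × Int × String)) (cc : Int) : List (Int × Int × Int × Int × String) → List (List (Int × Int × Int × Int × String))
  | [] => [cg]
  | b :: rest =>
    if cc + PySem.Str.len b.2.2.2.2 ≤ thr then
      pvGroups thr (cg ++ [b]) (cc + PySem.Str.len b.2.2.2.2) rest
    else
      cg :: pvGroups thr [b] (PySem.Str.len b.2.2.2.2) rest

lemma A_char (thr : Int) : ∀ (tbs : List (Int × Int × Int × Int × String)) cg cc gb, cg ≠ [] →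
    pvFinishA (tbs.foldl (pvStepA thr) (cg, gb, cc)) = gb ++ (pvGroups thr cg cc tbs).map pvEmit := by
  intro tbs
  induction tbs with
  | nil => intro cg cc gb h; simp [pvFinishA, pvGroups, h]
  | cons b rest ih =>
    intro cg cc gb h
    rw [List.foldl_cons]
    by_cases hc : cc + PySem.Str.len b.2.2.2.2 ≤ thr
    · rw [show pvStepA thr (cg, gb, cc) b = (cg ++ [b], gb, cc + PySem.Str.len b.2.2.2.2) by
        unfold pvStepA; rw [if_pos hc]]
      rw [ih _ _ _ (by simp), pvGroups, if_pos hc]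
    · rw [show pvStepA thr (cg, gb, cc) b = ([b], gb ++ [pvEmit cg], PySem.Str.len b.2.2.2.2) by
        unfold pvStepA; rw [if_neg hc, if_pos h]]
      rw [ih [b] _ _ (by simp), pvGroups, if_neg hc]
      simp

-- A's groups, emitted, are exactly B's chunks
lemma groups_to_chunks (thr : Int) : ∀ (l : List (Int × Int × Int × Int × String)) cg cc,
    (pvGroups thr cg cc l).map pvEmit
      = pvEmit (cg ++ l.take (pvFitLen thr cc l)) :: pvChunk thr (l.drop (pvFitLen thr cc l)) := by
  intro l
  induction l with
  | nil => intro cg cc; simp [pvGroups, pvFitLen, pvChunk]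
  | cons b rest ih =>
    intro cg cc
    by_cases hc : cc + PySem.Str.len b.2.2.2.2 ≤ thr
    · rw [pvGroups, if_pos hc, ih]
      rw [pvFitLen_cons, if_pos hc]
      rw [Nat.add_comm 1, List.take_succ_cons, List.drop_succ_cons, List.append_assoc]
      rfl
    · rw [pvGroups, if_neg hc]
      rw [pvFitLen_cons, if_neg hc]
      simp only [List.map_cons, List.take_zero, List.drop_zero, List.append_nil]
      rw [ih [b], pvChunk_cons]
      simp

-- ===== VERDICT (by name: the statement is the Claim_ definition above) =====
theorem process_text_blocks_spec : Claim_equal_process_text_blocks := by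
  intro tbs thr _
  unfold Spec_process_text_blocks process_text_blocks process_text_blocks_alt
  cases tbs with
  | nil => simp [pvFinishA, pvChunk]
  | cons b rest =>
    simp only [List.foldl_cons]
    rw [show pvStepA thr ([], [], 0) b = ([b], [], PySem.Str.len b.2.2.2.2) by
      unfold pvStepA; split_ifs <;> simp_all]
    rw [A_char thr rest [b] _ [] (by simp), groups_to_chunks, pvChunk_cons]
    simp
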